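-- pv_equiv track=rewrite | github.com/milan220284/mooc_Helsinki_PythonIntro_23 | part05-26_student_database/src/student_database.py | most_completed
-- ===== SOURCE A (Python) =====
-- def most_completed(dictionary: dict):
--     most = 0
--     for name in dictionary:
--         completed = 0
--         for course in dictionary[name]:
--             if dictionary[name][course] != 0:
--                 completed += 1
--         if completed > most:
--             most = completed
--             student = name
--     return student, most
-- ===== SOURCE B (Python) =====
-- def most_completed(dictionary: dict):
--     counts = [(name, sum(1 for grade in courses.values() if grade != 0))
--               for name, courses in dictionary.items()]
--
--     def best(items):
--         if not items:
--             raise ValueError("empty database")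
--         if len(items) == 1:
--             return items[0]
--         mid = len(items) // 2
--         left = best(items[:mid])
--         right = best(items[mid:])
--         return right if right[1] > left[1] else left
--
--     return best(counts)
-- ===== Notes on version B (the rewrite author's own statement) =====
-- stated objective: alternative
-- what changed: B first builds a counts table, then picks the winner by a recursive divide-and-conquer tournament (split in half, recurse, keep the left on ties) instead of A's fused nested loops with a running maximum; the tournament's left-on-tie combine preserves A's first-wins strict-maximum rule.
import Mathlib
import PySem

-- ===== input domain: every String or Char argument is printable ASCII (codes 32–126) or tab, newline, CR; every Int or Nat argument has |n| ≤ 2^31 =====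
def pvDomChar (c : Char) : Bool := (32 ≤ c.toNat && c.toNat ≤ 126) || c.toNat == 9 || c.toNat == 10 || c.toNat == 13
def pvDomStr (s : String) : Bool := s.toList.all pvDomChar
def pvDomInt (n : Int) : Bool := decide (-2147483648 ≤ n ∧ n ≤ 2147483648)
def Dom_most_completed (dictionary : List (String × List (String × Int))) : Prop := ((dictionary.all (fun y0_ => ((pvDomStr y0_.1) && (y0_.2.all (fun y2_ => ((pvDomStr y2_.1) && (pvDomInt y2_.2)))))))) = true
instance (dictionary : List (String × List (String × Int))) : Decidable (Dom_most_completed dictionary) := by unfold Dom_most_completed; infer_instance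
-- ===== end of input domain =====

-- B replaces A's fused running-max scan by a counts table plus a recursive
-- divide-and-conquer tournament (left wins ties), same first-wins strict maximum
-- (objective: alternative).

-- ===== PORT A =====
-- Literal port of A: most = 0; for each (name, courses): count nonzero grades;
-- update (most, student) on strict >. Python's unbound 'student' is the "" of the
-- initial state, reachable only outside Pre_ (where A raises UnboundLocalError).
def most_completed (dictionary : List (String × List (String × Int))) : String × Int :=
  let r := dictionary.foldl
    (fun (st : Int × String) p =>
      let completed := p.2.foldl (fun acc c => if c.2 ≠ 0 then acc + 1 else acc) (0 : Int)
      if completed > st.1 then (completed, p.1) else st)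
    ((0 : Int), "")
  (r.2, r.1)

-- ===== PORT B =====
-- Port of Source B's recursive tournament best(items): split at len//2, recurse,
-- keep the right only on a strictly larger count. Source B raises ValueError on the
-- empty list (outside Pre_); the port returns none there.
def pvTour : List (String × Int) → Option (String × Int)
  | [] => none
  | [x] => some x
  | x :: y :: t =>
    let mid := (x :: y :: t).length / 2
    match pvTour ((x :: y :: t).take mid), pvTour ((x :: y :: t).drop mid) with
    | some a, some b => some (if a.2 < b.2 then b else a)
    | some a, none => some a
    | none, some b => some b
    | none, none => none
termination_by l => l.length
decreasing_by
  · simp [List.length_take]; omega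
  · simp [List.length_drop]; omega

-- Port of Source B: the counts comprehension, then the tournament.
def most_completed_alt (dictionary : List (String × List (String × Int))) : String × Int :=
  let counts := dictionary.map (fun p => (p.1, ((p.2.countP (fun c => c.2 != 0)) : Int)))
  match pvTour counts with
  | some best => best
  | none => ("", 0)

-- ===== PRECONDITION & SPEC =====
-- Pre_ excludes exactly the inputs on which A raises UnboundLocalError: those with
-- no nonzero grade anywhere ('student' is then never assigned).
def Pre_most_completed (dictionary : List (String × List (String × Int))) : Prop :=
  ∃ p ∈ dictionary, ∃ c ∈ p.2, c.2 ≠ 0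
instance (dictionary : List (String × List (String × Int))) : Decidable (Pre_most_completed dictionary) := by unfold Pre_most_completed; infer_instance

def pvWitness_most_completed : (List (String × List (String × Int))) := [("a", [("c", 1)])]

def Spec_most_completed (dictionary : List (String × List (String × Int))) (out : String × Int) : Prop := out = most_completed_alt dictionary
instance (dictionary : List (String × List (String × Int))) (out : String × Int) : Decidable (Spec_most_completed dictionary out) := by unfold Spec_most_completed; infer_instance

-- ===== CLAIM (what is proved, stated in full; the proofs are below) =====
def Claim_equal_most_completed : Prop := ∀ (dictionary : List (String × List (String × Int))), Dom_most_completed dictionary → Pre_most_completed dictionary → Spec_most_completed dictionary (most_completed dictionary)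

-- ===== LEMMAS AND PROOFS =====

-- A's selection loop over an already-counted list.
def selA (l : List (String × Int)) (st : Int × String) : Int × String :=
  l.foldl (fun st q => if q.2 > st.1 then (q.2, q.1) else st) st

-- first-wins linear maximum starting from a concrete element
def lin (m : String × Int) (l : List (String × Int)) : String × Int :=
  l.foldl (fun b x => if b.2 < x.2 then x else b) m

-- option-carrying version of the linear maximum (bridge between A and the tournament)
def selB (l : List (String × Int)) (acc : Option (String × Int)) : Option (String × Int) :=
  l.foldl (fun acc x => match acc with
    | none => some x
    | some m => if m.2 < x.2 then some x else some m) acc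

theorem selB_some (l : List (String × Int)) : ∀ m, selB l (some m) = some (lin m l) := by
  induction l with
  | nil => intro m; rfl
  | cons x t ih =>
    intro m
    simp only [selB, lin, List.foldl_cons] at *
    by_cases h : m.2 < x.2
    · rw [if_pos h, if_pos h]; exact ih x
    · rw [if_neg h, if_neg h]; exact ih m

-- combining two first-wins maxima with 'right only if strictly larger' is the
-- first-wins maximum of the concatenation
theorem lin_merge (t : List (String × Int)) : ∀ (h : String × Int) (L : String × Int),
    lin (if L.2 < h.2 then h else L) t = if L.2 < (lin h t).2 then lin h t else L := by
  induction t with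
  | nil => intro h L; rfl
  | cons x t ih =>
    intro h L
    simp only [lin, List.foldl_cons] at *
    have key : (if (if L.2 < h.2 then h else L).2 < x.2 then x else (if L.2 < h.2 then h else L))
        = if L.2 < (if h.2 < x.2 then x else h).2 then (if h.2 < x.2 then x else h) else L := by
      split_ifs <;> first | rfl | omega
    rw [key]
    exact ih (if h.2 < x.2 then x else h) L

theorem lin_append (m : String × Int) (l1 l2 : List (String × Int)) :
    lin m (l1 ++ l2) = lin (lin m l1) l2 := by
  simp [lin, List.foldl_append]

-- the tournament computes the first-wins maximum
theorem pvTour_eq (n : Nat) : ∀ (x : String × Int) (t : List (String × Int)),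
    (x :: t).length ≤ n → pvTour (x :: t) = some (lin x t) := by
  induction n with
  | zero => intro x t h; simp at h
  | succ n ih =>
    intro x t hlen
    match t with
    | [] => simp [pvTour, lin]
    | y :: s =>
      rw [pvTour]
      have hlen' : s.length + 2 ≤ n + 1 := by simpa using hlen
      set mid := (x :: y :: s).length / 2 with hm
      have hmv : mid = (s.length + 2) / 2 := by simp [hm]; omega
      have hmid1 : 1 ≤ mid := by omega
      have hmid2 : mid < s.length + 2 := by omega
      have htake : (x :: y :: s).take mid = x :: (y :: s).take (mid - 1) := by
        have h1 : mid = (mid - 1) + 1 := by omega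
        rw [h1, List.take_succ_cons]; simp
      have hdrop : (x :: y :: s).drop mid = (y :: s).drop (mid - 1) := by
        have h1 : mid = (mid - 1) + 1 := by omega
        rw [h1, List.drop_succ_cons]; simp
      have hdropne : (x :: y :: s).drop mid ≠ [] := by
        intro h
        have := congrArg List.length h
        simp at this; omega
      obtain ⟨h2, t2, hdt⟩ := List.exists_cons_of_ne_nil hdropne
      have hlt1 : (x :: (y :: s).take (mid - 1)).length ≤ n := by
        simp only [List.length_cons, List.length_take]; omega
      have hlt2 : (h2 :: t2).length ≤ n := by
        have := congrArg List.length hdt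
        simp only [List.length_drop, List.length_cons] at this
        simp only [List.length_cons]
        omega
      have hsplit : y :: s = (y :: s).take (mid - 1) ++ (h2 :: t2) := by
        rw [← hdt, hdrop, List.take_append_drop]
      rw [htake, hdt, ih x _ hlt1, ih h2 t2 hlt2]
      have hgoal : lin x (y :: s)
          = if (lin x ((y :: s).take (mid - 1))).2 < (lin h2 t2).2 then lin h2 t2
            else lin x ((y :: s).take (mid - 1)) := by
        conv_lhs => rw [hsplit]
        rw [lin_append]
        have hc : lin (lin x ((y :: s).take (mid - 1))) (h2 :: t2)
            = lin (if (lin x ((y :: s).take (mid - 1))).2 < h2.2 then h2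
                   else lin x ((y :: s).take (mid - 1))) t2 := by
          simp only [lin, List.foldl_cons]
        rw [hc, lin_merge]
      rw [hgoal]

theorem selB_eq_tour (x : String × Int) (t : List (String × Int)) :
    pvTour (x :: t) = selB (x :: t) none := by
  rw [pvTour_eq (x :: t).length x t le_rfl]
  simp only [selB, List.foldl_cons]
  exact (selB_some t x).symm

-- once both loops carry a real state, they update on the same strict condition
theorem sel_rel (l : List (String × Int)) : ∀ (m : Int) (s : String),
    selB l (some (s, m)) = some ((selA l (m, s)).2, (selA l (m, s)).1) := by
  induction l with
  | nil => intro m s; rfl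
  | cons q t ih =>
    intro m s
    simp only [selA, selB, List.foldl_cons]
    by_cases h : m < q.2
    · rw [if_pos h, if_pos (by exact h)]
      exact ih q.2 q.1
    · rw [if_neg h, if_neg (by exact h)]
      exact ih m s

-- while A is still at most = 0 and B holds an element with nonpositive count,
-- a coming positive count resynchronises them
theorem sel_skew (l : List (String × Int)) : ∀ (t : String) (c : Int) (s : String),
    c ≤ 0 → (∃ q ∈ l, 0 < q.2) →
    selB l (some (t, c)) = some ((selA l (0, s)).2, (selA l (0, s)).1) := by
  induction l with
  | nil => intro _ _ _ _ h; simp at h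
  | cons q r ih =>
    intro t c s hc hex
    simp only [selA, selB, List.foldl_cons]
    by_cases hq : 0 < q.2
    · rw [if_pos (lt_of_le_of_lt hc hq), if_pos hq]
      exact sel_rel r q.2 q.1
    · have hex' : ∃ x ∈ r, 0 < x.2 := by
        rcases hex with ⟨x, hx, hxp⟩
        rcases List.mem_cons.mp hx with h | h
        · exact absurd (h ▸ hxp) hq
        · exact ⟨x, h, hxp⟩
      rw [if_neg hq]
      by_cases hcq : c < q.2
      · rw [if_pos hcq]; exact ih q.1 q.2 s (le_of_not_gt hq) hex'
      · rw [if_neg hcq]; exact ih t c s hc hex'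

theorem sel_top (l : List (String × Int)) (s : String)
    (hex : ∃ q ∈ l, 0 < q.2) :
    selB l none = some ((selA l (0, s)).2, (selA l (0, s)).1) := by
  cases l with
  | nil => simp at hex
  | cons q r =>
    simp only [selA, selB, List.foldl_cons]
    by_cases hq : 0 < q.2
    · rw [if_pos hq]; exact sel_rel r q.2 q.1
    · have hex' : ∃ x ∈ r, 0 < x.2 := by
        rcases hex with ⟨x, hx, hxp⟩
        rcases List.mem_cons.mp hx with h | h
        · exact absurd (h ▸ hxp) hq
        · exact ⟨x, h, hxp⟩
      rw [if_neg hq]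
      exact sel_skew r q.1 q.2 s (le_of_not_gt hq) hex'

-- A's inner counting loop is the countP of B's table
theorem inner_count (cs : List (String × Int)) :
    cs.foldl (fun acc c => if c.2 ≠ 0 then acc + 1 else acc) (0 : Int)
      = ((cs.countP (fun c => c.2 != 0)) : Int) := by
  rw [PySem.List.foldl_ite_add_one]
  rw [zero_add]
  refine congrArg _ (List.countP_congr ?_)
  intro a _
  simp [bne]

-- ===== VERDICT (by name: the statement is the Claim_ definition above) =====
theorem most_completed_spec : Claim_equal_most_completed := by
  intro d _hdom hpre
  unfold Spec_most_completed most_completed most_completed_alt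
  have hfold :
      d.foldl (fun (st : Int × String) p =>
        let completed := p.2.foldl (fun acc c => if c.2 ≠ 0 then acc + 1 else acc) (0 : Int)
        if completed > st.1 then (completed, p.1) else st) ((0 : Int), "")
      = selA (d.map (fun p => (p.1, ((p.2.countP (fun c => c.2 != 0)) : Int)))) (0, "") := by
    rw [selA, List.foldl_map]
    apply PySem.List.foldl_congr_mem
    intro acc p _
    simp only [inner_count]
  have hex : ∃ q ∈ d.map (fun p => (p.1, ((p.2.countP (fun c => c.2 != 0)) : Int))), 0 < q.2 := by
    rcases hpre with ⟨p, hp, c, hc, hcz⟩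
    refine ⟨(p.1, ((p.2.countP (fun c => c.2 != 0)) : Int)), List.mem_map_of_mem hp, ?_⟩
    have : 0 < p.2.countP (fun c => c.2 != 0) := by
      exact List.countP_pos_iff.mpr ⟨c, hc, by simpa using hcz⟩
    dsimp only
    exact_mod_cast this
  obtain ⟨x, t, hxt⟩ : ∃ x t, d.map (fun p => (p.1, ((p.2.countP (fun c => c.2 != 0)) : Int))) = x :: t := by
    rcases hex with ⟨q, hq, _⟩
    rcases List.exists_cons_of_ne_nil (List.ne_nil_of_mem hq) with ⟨x, t, h⟩
    exact ⟨x, t, h⟩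
  have htour : pvTour (d.map (fun p => (p.1, ((p.2.countP (fun c => c.2 != 0)) : Int))))
      = some ((selA (d.map (fun p => (p.1, ((p.2.countP (fun c => c.2 != 0)) : Int)))) (0, "")).2,
              (selA (d.map (fun p => (p.1, ((p.2.countP (fun c => c.2 != 0)) : Int)))) (0, "")).1) := by
    rw [hxt, selB_eq_tour, ← hxt]
    exact sel_top _ "" hex
  simp only [hfold, htour]
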